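-- pv_equiv track=rewrite | github.com/peaches12/ALEXANDRA_PROJECTS | New Languages/New Langague--Alussian.py | alphabetical_vowels
-- ===== SOURCE A (Python) =====
-- def alphabetical_vowels(messyVowels):
--     alphieVowels = ''
--     VOWELS = 'aeiouy'
--     for vowel in VOWELS:
--         for letra in messyVowels:
--             if letra == vowel:
--                 alphieVowels += vowel
--     return alphieVowels
-- ===== SOURCE B (Python) =====
-- def alphabetical_vowels(messyVowels):
--     counts = {}
--     for ch in messyVowels:
--         counts[ch] = counts.get(ch, 0) + 1
--     return ''.join(v * counts.get(v, 0) for v in 'aeiouy')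
-- ===== Notes on version B (the rewrite author's own statement) =====
-- stated objective: faster
-- what changed: Replaced A's six full scans of the input (one per vowel, appending on each match) by a single counting pass building a frequency dict, then one emit pass over the fixed 6-letter vowel alphabet using vowel*count.
import Mathlib
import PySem

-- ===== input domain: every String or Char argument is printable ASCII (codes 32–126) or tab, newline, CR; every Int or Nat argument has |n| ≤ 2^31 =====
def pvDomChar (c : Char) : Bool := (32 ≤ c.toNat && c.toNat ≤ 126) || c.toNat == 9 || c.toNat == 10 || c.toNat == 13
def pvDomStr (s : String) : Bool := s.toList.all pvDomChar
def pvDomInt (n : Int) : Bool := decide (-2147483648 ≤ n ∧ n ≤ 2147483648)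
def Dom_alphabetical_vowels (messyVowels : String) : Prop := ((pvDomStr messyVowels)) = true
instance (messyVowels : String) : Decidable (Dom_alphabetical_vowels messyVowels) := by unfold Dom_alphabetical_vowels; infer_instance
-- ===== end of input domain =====

-- B replaces A's six vowel-by-vowel scans of the input with one counting pass plus one emit pass over "aeiouy" (constant-factor faster).


-- ===== PORT A =====
-- for vowel in 'aeiouy': for letra in messyVowels: if letra == vowel: alphieVowels += vowel
def alphabetical_vowels (messyVowels : String) : String :=
  String.ofList <|
    "aeiouy".toList.foldl (fun acc vowel =>
      messyVowels.toList.foldl (fun acc2 letra =>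
        if letra == vowel then acc2 ++ [vowel] else acc2) acc) []

-- ===== PORT B =====
-- counts[ch] = counts.get(ch,0)+1 in one pass, then ''.join(v * counts.get(v,0) for v in 'aeiouy')
def alphabetical_vowels_alt (messyVowels : String) : String :=
  let counts : PySem.Dict Char Int :=
    messyVowels.toList.foldl (fun d ch => d.insert ch (d.getD ch 0 + 1)) PySem.Dict.empty
  String.ofList (("aeiouy".toList.map (fun v => List.replicate (counts.getD v 0).toNat v)).flatten)

-- ===== PRECONDITION & SPEC =====
def Spec_alphabetical_vowels (messyVowels : String) (out : String) : Prop := out = alphabetical_vowels_alt messyVowels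
instance (messyVowels : String) (out : String) : Decidable (Spec_alphabetical_vowels messyVowels out) := by unfold Spec_alphabetical_vowels; infer_instance

-- ===== CLAIM (what is proved, stated in full; the proofs are below) =====
def Claim_equal_alphabetical_vowels : Prop := ∀ (messyVowels : String), Dom_alphabetical_vowels messyVowels → Spec_alphabetical_vowels messyVowels (alphabetical_vowels messyVowels)

-- ===== LEMMAS AND PROOFS =====

-- A's inner loop over the input appends one copy of v per occurrence of v.
theorem pv_inner (v : Char) (l : List Char) (acc : List Char) :
    l.foldl (fun a c => if c == v then a ++ [v] else a) acc
      = acc ++ List.replicate (l.count v) v := by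
  induction l generalizing acc with
  | nil => simp
  | cons c t ih =>
    rw [List.foldl_cons]
    by_cases h : (c == v) = true
    · rw [if_pos h, ih]
      have hc : c = v := by simpa using h
      subst hc
      simp [List.replicate_succ, List.append_assoc]
    · rw [if_neg h, ih]
      simp [List.count_cons, h]

-- A's outer loop concatenates those blocks in vowel order.
theorem pv_outer (l : List Char) (vs : List Char) (acc : List Char) :
    vs.foldl (fun acc v =>
        l.foldl (fun a c => if c == v then a ++ [v] else a) acc) acc
      = acc ++ (vs.map (fun v => List.replicate (l.count v) v)).flatten := by
  induction vs generalizing acc with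
  | nil => simp
  | cons v t ih =>
    rw [List.foldl_cons, ih, pv_inner]
    simp [List.append_assoc]

theorem alphabetical_vowels_spec : Claim_equal_alphabetical_vowels := by
  intro s _
  unfold Spec_alphabetical_vowels alphabetical_vowels alphabetical_vowels_alt
  rw [pv_outer]
  simp [PySem.Dict.getD_foldl_insert_add_one, PySem.Dict.getD_empty]
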